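-- pv_equiv track=rewrite | github.com/Quelklef/phone-price-scraper | sellers/smoke_match.py | _split_combined_variant_token
-- ===== SOURCE A (Python) =====
-- _VARIANT_TOKENS = frozenset(
--     {
--         "a",      # Google Pixel A-series (e.g. 8a).
--         "plus",   # Common larger-tier suffix (e.g. iPhone Plus, Galaxy Plus).
--         "pro",    # Common premium-tier suffix across brands.
--         "max",    # Max-tier suffix (often larger/better spec variant).
--         "ultra",  # Top-tier suffix (common on Samsung/Xiaomi).
--         "mini",   # Compact variant suffix.
--         "lite",   # Lower-tier/lighter feature variant.
--         "fe",     # Samsung "Fan Edition".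
--         "fold",   # Foldable-book style variant (Fold/Pro Fold).
--         "flip",   # Clamshell foldable variant.
--         "xl",     # Extra-large variant suffix.
--         "se",     # Apple "Special Edition" style suffix.
--         "t",      # OnePlus T refresh variant.
--         "r",      # OnePlus R performance/value branch.
--         "edge",   # Motorola/Samsung-style edge branded variant.
--         "core",   # Core/entry-tier variant suffix.
--         "neo",    # Neo refresh/sub-variant suffix.
--     }
-- )
--
-- def _split_combined_variant_token(token):
--     """Split compact variant words like 'promax' or 'proxl' into components."""
--     out = []
--     remaining = token
--     # Keep the token set stable in matching order so split is deterministic.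
--     ordered = sorted(_VARIANT_TOKENS, key=len, reverse=True)
--     while remaining:
--         matched = None
--         for candidate in ordered:
--             if remaining.startswith(candidate):
--                 matched = candidate
--                 break
--         if matched is None:
--             return []
--         out.append(matched)
--         remaining = remaining[len(matched):]
--     return out
-- ===== SOURCE B (Python) =====
-- _VARIANT_TOKENS = frozenset(
--     {
--         "a", "plus", "pro", "max", "ultra", "mini", "lite", "fe", "fold",
--         "flip", "xl", "se", "t", "r", "edge", "core", "neo",
--     }
-- )
--
-- _MAX_TOKEN_LEN = 5  # == max(len(t) for t in _VARIANT_TOKENS)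
--
--
-- def _split_combined_variant_token(token):
--     """Split compact variant words like 'promax' or 'proxl' into components."""
--     out = []
--     remaining = token
--     while remaining:
--         for length in range(_MAX_TOKEN_LEN, 0, -1):
--             piece = remaining[:length]
--             if piece in _VARIANT_TOKENS:
--                 out.append(piece)
--                 remaining = remaining[length:]
--                 break
--         else:
--             return []
--     return out
-- ===== Notes on version B (the rewrite author's own statement) =====
-- stated objective: idiomatic
-- what changed: The inner scan over a per-call length-sorted candidate list is replaced by a descending loop over prefix lengths (5..1) with a frozenset membership test, so no sorted candidate list is built or scanned.
import Mathlib
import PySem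

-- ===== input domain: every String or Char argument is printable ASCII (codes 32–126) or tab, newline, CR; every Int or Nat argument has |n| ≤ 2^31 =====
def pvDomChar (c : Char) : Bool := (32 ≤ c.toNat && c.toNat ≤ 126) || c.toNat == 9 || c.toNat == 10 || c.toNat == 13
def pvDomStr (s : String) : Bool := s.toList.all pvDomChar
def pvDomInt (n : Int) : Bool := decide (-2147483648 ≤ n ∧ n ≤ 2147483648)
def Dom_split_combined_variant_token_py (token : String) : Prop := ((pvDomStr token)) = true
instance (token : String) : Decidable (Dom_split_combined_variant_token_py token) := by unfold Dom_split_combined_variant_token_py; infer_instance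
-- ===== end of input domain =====

-- B replaces A's per-call sort and inner scan over the 17 candidates with a descending loop
-- over prefix lengths 5..1 using a set membership test (objective: idiomatic; same cost class).

-- ===== PORT A =====
-- _VARIANT_TOKENS (the module-level frozenset; written in source order)
def pvTokens : List String :=
  ["a", "plus", "pro", "max", "ultra", "mini", "lite", "fe", "fold",
   "flip", "xl", "se", "t", "r", "edge", "core", "neo"]

def pvSet : PySem.Set String := PySem.Set.ofList pvTokens

-- ordered = sorted(_VARIANT_TOKENS, key=len, reverse=True)
def pvAOrdered : List String := PySem.List.sorted pvSet (fun s => PySem.Str.len s) true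

-- the 'while remaining:' loop of A
def pvALoop (remaining : List Char) (out : List String) : List String :=
  if _hr : remaining = [] then out
  else
    match hm : pvAOrdered.find? (fun c => PySem.Chars.startswith remaining c.toList) with
    | none => []
    | some m =>
        pvALoop (PySem.List.slice remaining (some (m.toList.length : Int)) none) (out ++ [m])
termination_by remaining.length
decreasing_by
  have hmem : m ∈ pvTokens := by
    have h1 := List.mem_of_find?_eq_some hm
    rw [pvAOrdered, PySem.List.mem_sorted, pvSet, PySem.Set.mem_ofList] at h1
    exact h1
  have h1 : 1 ≤ m.toList.length := by fin_cases hmem <;> decide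
  rw [PySem.List.slice_from _ (by positivity)]
  simp only [List.length_drop, Int.toNat_natCast]
  have h2 : remaining ≠ [] := _hr
  have h3 : 1 ≤ remaining.length := List.length_pos_iff.mpr h2
  omega

def split_combined_variant_token_py (token : String) : List String :=
  pvALoop token.toList []

-- ===== PORT B =====
def pvMaxTokenLen : Int := 5  -- _MAX_TOKEN_LEN

-- the 'while remaining:' loop of B: inner 'for length in range(5, 0, -1)' with set lookup
def pvBLoop (remaining : List Char) (out : List String) : List String :=
  if _hr : remaining = [] then out
  else
    match hm : (PySem.List.pyRange pvMaxTokenLen 0 (-1)).find?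
        (fun L => PySem.Set.contains pvSet (String.ofList (PySem.List.slice remaining none (some L)))) with
    | none => []
    | some L =>
        pvBLoop (PySem.List.slice remaining (some L) none)
          (out ++ [String.ofList (PySem.List.slice remaining none (some L))])
termination_by remaining.length
decreasing_by
  have hL : L ∈ PySem.List.pyRange pvMaxTokenLen 0 (-1) := List.mem_of_find?_eq_some hm
  have hlit : PySem.List.pyRange pvMaxTokenLen 0 (-1) = [5, 4, 3, 2, 1] := by decide
  rw [hlit] at hL
  have h1 : 0 ≤ L ∧ 1 ≤ L.toNat := by fin_cases hL <;> decide
  rw [PySem.List.slice_from _ h1.1]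
  simp only [List.length_drop]
  have h2 : remaining ≠ [] := _hr
  have h3 : 1 ≤ remaining.length := List.length_pos_iff.mpr h2
  omega

def split_combined_variant_token_py_alt (token : String) : List String :=
  pvBLoop token.toList []

-- ===== PRECONDITION & SPEC =====
def Spec_split_combined_variant_token_py (token : String) (out : List String) : Prop := out = split_combined_variant_token_py_alt token
instance (token : String) (out : List String) : Decidable (Spec_split_combined_variant_token_py token out) := by unfold Spec_split_combined_variant_token_py; infer_instance

-- ===== CLAIM (what is proved, stated in full; the proofs are below) =====
def Claim_equal_split_combined_variant_token_py : Prop := ∀ (token : String), Dom_split_combined_variant_token_py token → Spec_split_combined_variant_token_py token (split_combined_variant_token_py token)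

-- ===== LEMMAS AND PROOFS =====

-- no variant token is a proper prefix of another, so at most one token is a prefix of any string
theorem pvTokens_prefix_uniq : ∀ c ∈ pvTokens, ∀ d ∈ pvTokens, c.toList <+: d.toList → c = d := by
  decide

theorem pvTokens_len : ∀ c ∈ pvTokens, 1 ≤ c.toList.length ∧ c.toList.length ≤ 5 := by
  decide

theorem pv_mem_ordered_iff {c : String} : c ∈ pvAOrdered ↔ c ∈ pvTokens := by
  rw [pvAOrdered, PySem.List.mem_sorted, pvSet, PySem.Set.mem_ofList]

theorem pv_contains_iff {s : String} : PySem.Set.contains pvSet s = true ↔ s ∈ pvTokens := by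
  rw [PySem.Set.contains_iff, pvSet, PySem.Set.mem_ofList]

theorem pv_drop_min (l : List α) (a : Nat) : l.drop (min a l.length) = l.drop a := by
  rcases le_total a l.length with h | h
  · rw [min_eq_left h]
  · rw [min_eq_right h, List.drop_eq_nil_of_le h, List.drop_eq_nil_of_le (le_refl _)]

-- the matches of the two inner loops agree: A's first length-sorted prefix candidate is
-- exactly the piece remaining[:L] at B's first matching length L
theorem pv_match_eq (r : List Char) :
    pvAOrdered.find? (fun c => PySem.Chars.startswith r c.toList)
      = ((PySem.List.pyRange pvMaxTokenLen 0 (-1)).find?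
          (fun L => PySem.Set.contains pvSet (String.ofList (PySem.List.slice r none (some L))))).map
          (fun L => String.ofList (PySem.List.slice r none (some L))) := by
  have hlit : PySem.List.pyRange pvMaxTokenLen 0 (-1) = [5, 4, 3, 2, 1] := by decide
  cases hA : pvAOrdered.find? (fun c => PySem.Chars.startswith r c.toList) with
  | none =>
    have hnone := List.find?_eq_none.mp hA
    have hB : (PySem.List.pyRange pvMaxTokenLen 0 (-1)).find?
        (fun L => PySem.Set.contains pvSet (String.ofList (PySem.List.slice r none (some L)))) = none := by
      apply List.find?_eq_none.mpr
      intro L hL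
      rw [hlit] at hL
      have h0 : (0:Int) ≤ L := by fin_cases hL <;> decide
      simp only [Bool.not_eq_true]
      by_contra hc
      rw [Bool.not_eq_false, pv_contains_iff] at hc
      have hpre : (String.ofList (PySem.List.slice r none (some L))).toList <+: r := by
        rw [String.toList_ofList, PySem.List.slice_to _ h0]
        exact List.take_prefix _ _
      have := hnone _ (pv_mem_ordered_iff.mpr hc)
      rw [Bool.not_eq_true, ← Bool.not_eq_true, PySem.Chars.startswith_iff] at this
      rw [String.toList_ofList] at hpre
      exact this (by rw [String.toList_ofList]; exact hpre)
    rw [hB]; rfl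
  | some m =>
    have hmem : m ∈ pvTokens := pv_mem_ordered_iff.mp (List.mem_of_find?_eq_some hA)
    have hpred := List.find?_some hA
    rw [PySem.Chars.startswith_iff] at hpred
    -- B's predicate is true at L = len(m), so B's find? returns some L
    have hlen := pvTokens_len m hmem
    have hsome : ((PySem.List.pyRange pvMaxTokenLen 0 (-1)).find?
        (fun L => PySem.Set.contains pvSet (String.ofList (PySem.List.slice r none (some L))))).isSome := by
      apply List.find?_isSome.mpr
      refine ⟨(m.toList.length : Int), ?_, ?_⟩
      · rw [hlit]
        have h1 := hlen.1; have h2 := hlen.2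
        interval_cases h : m.toList.length <;> simp
      · rw [PySem.List.slice_to _ (by positivity), Int.toNat_natCast,
          ← List.prefix_iff_eq_take.mp hpred]
        simp only [String.ofList_toList]
        exact pv_contains_iff.mpr hmem
    obtain ⟨L, hB⟩ := Option.isSome_iff_exists.mp hsome
    have hLmem : L ∈ [5, 4, 3, 2, 1] := by rw [← hlit]; exact List.mem_of_find?_eq_some hB
    have h0 : (0:Int) ≤ L := by fin_cases hLmem <;> decide
    have hpL := List.find?_some hB
    rw [pv_contains_iff] at hpL
    have hpreL : (String.ofList (PySem.List.slice r none (some L))).toList <+: r := by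
      rw [String.toList_ofList, PySem.List.slice_to _ h0]
      exact List.take_prefix _ _
    have heq : String.ofList (PySem.List.slice r none (some L)) = m := by
      rcases List.prefix_or_prefix_of_prefix hpreL hpred with h | h
      · exact pvTokens_prefix_uniq _ hpL _ hmem h
      · exact (pvTokens_prefix_uniq _ hmem _ hpL h).symm
    rw [hB, Option.map_some, heq]

-- one synchronized step preserves equality of the two loops, by strong induction on the length
theorem pv_loop_eq : ∀ (n : Nat) (r : List Char) (out : List String),
    r.length ≤ n → pvALoop r out = pvBLoop r out := by
  intro n
  induction n with
  | zero =>
    intro r out hr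
    have : r = [] := List.eq_nil_of_length_eq_zero (Nat.le_zero.mp hr)
    subst this
    rw [pvALoop, pvBLoop]
    simp
  | succ n ih =>
    intro r out hr
    by_cases hnil : r = []
    · subst hnil; rw [pvALoop, pvBLoop]; simp
    · rw [pvALoop, pvBLoop]
      simp only [hnil, dite_false]
      have hkey := pv_match_eq r
      cases hB : (PySem.List.pyRange pvMaxTokenLen 0 (-1)).find?
          (fun L => PySem.Set.contains pvSet (String.ofList (PySem.List.slice r none (some L)))) with
      | none =>
        rw [hB] at hkey
        simp only [Option.map_none] at hkey
        rw [hkey]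
      | some L =>
        rw [hB] at hkey
        simp only [Option.map_some] at hkey
        rw [hkey]
        show pvALoop (PySem.List.slice r
              (some ((String.ofList (PySem.List.slice r none (some L))).toList.length : Int)) none)
            (out ++ [String.ofList (PySem.List.slice r none (some L))])
          = pvBLoop (PySem.List.slice r (some L) none)
            (out ++ [String.ofList (PySem.List.slice r none (some L))])
        -- the two remainders coincide
        have hlit : PySem.List.pyRange pvMaxTokenLen 0 (-1) = [5, 4, 3, 2, 1] := by decide
        have hLmem : L ∈ [5, 4, 3, 2, 1] := by rw [← hlit]; exact List.mem_of_find?_eq_some hB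
        have h0 : (0:Int) ≤ L ∧ 1 ≤ L.toNat := by fin_cases hLmem <;> decide
        have hlistlen : (String.ofList (PySem.List.slice r none (some L))).toList.length
            = min L.toNat r.length := by
          rw [String.toList_ofList, PySem.List.slice_to _ h0.1, List.length_take]
        have hrem : PySem.List.slice r
              (some ((String.ofList (PySem.List.slice r none (some L))).toList.length : Int)) none
            = PySem.List.slice r (some L) none := by
          rw [PySem.List.slice_from _ (by positivity), PySem.List.slice_from _ h0.1,
            Int.toNat_natCast, hlistlen, pv_drop_min]
        rw [hrem]
        apply ih
        rw [PySem.List.slice_from _ h0.1, List.length_drop]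
        have h3 : 1 ≤ r.length := List.length_pos_iff.mpr hnil
        omega

-- ===== VERDICT (by name: the statement is the Claim_ definition above) =====
theorem split_combined_variant_token_py_spec : Claim_equal_split_combined_variant_token_py := by
  intro token _
  unfold Spec_split_combined_variant_token_py
  unfold split_combined_variant_token_py split_combined_variant_token_py_alt
  exact pv_loop_eq token.toList.length token.toList [] (le_refl _)
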